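-- pv_equiv track=rewrite | github.com/daniel-reich/ubiquitous-fiesta | 9fbbjaLt22Zfvjjau_7.py | paul_cipher
-- ===== SOURCE A (Python) =====
-- def paul_cipher(txt):
--   shift = lambda a, b: chr((ord(a) + ord(b) - 129) % 26 + 65)
--   txt = txt.upper()
--   res = ""
--   prev = ""
--   for i in range(len(txt)):
--     if txt[i].isalpha():
--       res += shift(prev, txt[i]) if prev else txt[i]
--       prev = txt[i]
--     else:
--       res += txt[i]
--   return res
-- ===== SOURCE B (Python) =====
-- def paul_cipher(txt):
--   shift = lambda a, b: chr((ord(a) + ord(b) - 129) % 26 + 65)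
--   txt = txt.upper()
--
--   def prev_alpha(i):
--     # last alphabetic character strictly before position i, if any
--     for c in reversed(txt[:i]):
--       if c.isalpha():
--         return c
--     return None
--
--   out = []
--   for i, c in enumerate(txt):
--     if c.isalpha():
--       p = prev_alpha(i)
--       out.append(shift(p, c) if p is not None else c)
--     else:
--       out.append(c)
--   return ''.join(out)
-- ===== Notes on version B (the rewrite author's own statement) =====
-- stated objective: alternative
-- what changed: Instead of threading running previous-letter state through one scan while concatenating onto a string, B computes each output position independently by searching backwards through the uppercased prefix for the preceding alphabetic character, collecting results in a list.
import Mathlib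
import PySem

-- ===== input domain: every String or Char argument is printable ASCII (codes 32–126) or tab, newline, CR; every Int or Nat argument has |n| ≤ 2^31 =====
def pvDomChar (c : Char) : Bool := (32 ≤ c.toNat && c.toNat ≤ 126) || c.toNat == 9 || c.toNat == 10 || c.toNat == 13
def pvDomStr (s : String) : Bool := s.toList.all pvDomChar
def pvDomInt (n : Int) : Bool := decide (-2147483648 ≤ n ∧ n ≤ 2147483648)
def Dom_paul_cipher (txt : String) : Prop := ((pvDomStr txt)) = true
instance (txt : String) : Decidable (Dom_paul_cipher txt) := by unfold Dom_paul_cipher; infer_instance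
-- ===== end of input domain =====

-- B replaces A's running-'prev' single scan by an independent per-position backward
-- search for the previous alphabetic character (alternative decomposition, not faster).

-- ===== PORT A =====
-- shift = lambda a, b: chr((ord(a) + ord(b) - 129) % 26 + 65)   (shared by both Pythons)
def pvShift (a b : Char) : Char :=
  Char.ofNat ((PySem.Int.mod ((a.toNat : Int) + (b.toNat : Int) - 129) 26).toNat + 65)

-- the loop carries (res, prev); prev = "" (falsy) is rendered as none
def paul_cipher (txt : String) : String :=
  let u := (PySem.Str.upper txt).toList
  let r := u.foldl
    (fun (st : List Char × Option Char) c =>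
      if PySem.Chars.isalpha c then
        (st.1 ++ [(match st.2 with | some p => pvShift p c | none => c)], some c)
      else
        (st.1 ++ [c], st.2))
    ([], none)
  String.ofList r.1

-- ===== PORT B =====
-- prev_alpha(i): scan reversed(txt[:i]) for the first alphabetic char
def pvPrevAlpha (u : List Char) (i : Nat) : Option Char :=
  ((u.take i).reverse).find? PySem.Chars.isalpha

def paul_cipher_alt (txt : String) : String :=
  let u := (PySem.Str.upper txt).toList
  String.ofList <| u.zipIdx.map (fun p =>
    if PySem.Chars.isalpha p.1 then
      match pvPrevAlpha u p.2 with
      | some q => pvShift q p.1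
      | none => p.1
    else p.1)

-- ===== PRECONDITION & SPEC =====
def Spec_paul_cipher (txt : String) (out : String) : Prop := out = paul_cipher_alt txt
instance (txt : String) (out : String) : Decidable (Spec_paul_cipher txt out) := by unfold Spec_paul_cipher; infer_instance

-- ===== CLAIM (what is proved, stated in full; the proofs are below) =====
def Claim_equal_paul_cipher : Prop := ∀ (txt : String), Dom_paul_cipher txt → Spec_paul_cipher txt (paul_cipher txt)

-- ===== LEMMAS AND PROOFS =====

-- common reference recursion: history h is the reversed prefix already processed
def pvG (h l : List Char) : List Char :=
  match l with
  | [] => []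
  | c :: cs =>
    (if PySem.Chars.isalpha c then
      match h.find? PySem.Chars.isalpha with
      | some p => pvShift p c
      | none => c
     else c) :: pvG (c :: h) cs

lemma pvA_fold (l : List Char) : ∀ (h res : List Char),
    (l.foldl
      (fun (st : List Char × Option Char) c =>
        if PySem.Chars.isalpha c then
          (st.1 ++ [(match st.2 with | some p => pvShift p c | none => c)], some c)
        else
          (st.1 ++ [c], st.2))
      (res, h.find? PySem.Chars.isalpha)).1 = res ++ pvG h l := by
  induction l with
  | nil => intro h res; simp [pvG]
  | cons c cs ih =>
    intro h res
    by_cases hc : PySem.Chars.isalpha c = true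
    · have h1 : (c :: h).find? PySem.Chars.isalpha = some c := by
        simp [List.find?, hc]
      simp only [List.foldl_cons, pvG, if_pos hc]
      rw [← h1, ih (c :: h)]
      simp
    · have h1 : (c :: h).find? PySem.Chars.isalpha = h.find? PySem.Chars.isalpha := by
        simp [List.find?, hc]
      simp only [List.foldl_cons, pvG, if_neg hc]
      rw [← h1, ih (c :: h)]
      simp

lemma pvB_map (u : List Char) (l : List Char) : ∀ (h : List Char), h.reverse ++ l = u →
    (l.zipIdx h.length).map (fun p =>
      if PySem.Chars.isalpha p.1 then
        match pvPrevAlpha u p.2 with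
        | some q => pvShift q p.1
        | none => p.1
      else p.1) = pvG h l := by
  induction l with
  | nil => intro h _; simp [pvG]
  | cons c cs ih =>
    intro h hu
    have htake : u.take h.length = h.reverse := by
      rw [← hu]
      simpa using (List.take_left (l₁ := h.reverse) (l₂ := c :: cs))
    have hpa : pvPrevAlpha u h.length = h.find? PySem.Chars.isalpha := by
      simp [pvPrevAlpha, htake]
    have hu' : (c :: h).reverse ++ cs = u := by
      simpa using hu
    have ih' := ih (c :: h) hu'
    simp only [List.length_cons] at ih'
    simp only [List.zipIdx_cons, List.map_cons, pvG, hpa, ih']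

theorem pv_main (u : List Char) :
    (u.foldl
      (fun (st : List Char × Option Char) c =>
        if PySem.Chars.isalpha c then
          (st.1 ++ [(match st.2 with | some p => pvShift p c | none => c)], some c)
        else
          (st.1 ++ [c], st.2))
      ([], none)).1
    = u.zipIdx.map (fun p =>
      if PySem.Chars.isalpha p.1 then
        match pvPrevAlpha u p.2 with
        | some q => pvShift q p.1
        | none => p.1
      else p.1) := by
  have hA := pvA_fold u [] []
  have hB := pvB_map u u [] (by simp)
  simp only [List.find?] at hA
  rw [hA]
  simpa using hB.symm

-- ===== VERDICT (by name: the statement is the Claim_ definition above) =====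
theorem paul_cipher_spec : Claim_equal_paul_cipher := by
  intro txt _
  unfold Spec_paul_cipher paul_cipher paul_cipher_alt
  simp only [pv_main]
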